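-- pv_equiv track=rewrite | github.com/TanguyMuller/Genomic_of_Allochrony | Inference_of_the_demographic_hystory/compute_stat.py | count_distance_sequences
-- ===== SOURCE A (Python) =====
-- def count_distance_sequences (sequence):
--
--     distances = []
--
--     # Initialize the list of groups
--
--     groups = []
--
--     # Initialize variables for the current group
--
--     current_group = []
--
--     current_value = None
--
--     # Iterate over the input list
--
--     for value in sequence:
--
--         # If the current value is different from the previous value,
--
--         # start a new group
--
--         if value != current_value:
--
--             if current_group:
--
--                 groups.append(current_group)
--
--                 current_group = []
--
--         # Add the current value to the current group
--
--         current_group.append(value)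
--
--         # Update the current value
--
--         current_value = value
--
--     # Add the last group to the list of groups
--
--     if current_group:
--
--         groups.append(current_group)
--
--
--     for group in groups :
--
--         if group[0]== 0:
--
--             distances.append(len(group))
--
--         elif len(group) >= 2 :
--
--             for i in range (len(group)-1):
--
--                 distances.append(0)
--
--     return distances
-- ===== SOURCE B (Python) =====
-- def _flush(distances, prev, run_len):
--     # emit the finished run: its length if it is a zero-run, else run_len-1 zeros
--     if run_len:
--         if prev == 0:
--             distances.append(run_len)
--         else:
--             distances.extend([0] * (run_len - 1))
--
-- def count_distance_sequences(sequence):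
--     distances = []
--     prev = None
--     run_len = 0
--     for v in sequence:
--         if run_len and v == prev:
--             run_len += 1
--         else:
--             _flush(distances, prev, run_len)
--             prev = v
--             run_len = 1
--     _flush(distances, prev, run_len)
--     return distances
-- ===== Notes on version B (the rewrite author's own statement) =====
-- stated objective: simpler
-- what changed: Single streaming pass keeping only (prev, run_len) and emitting each run's contribution as it closes, instead of materializing the full list of group lists and then scanning it in a second loop.
import Mathlib
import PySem

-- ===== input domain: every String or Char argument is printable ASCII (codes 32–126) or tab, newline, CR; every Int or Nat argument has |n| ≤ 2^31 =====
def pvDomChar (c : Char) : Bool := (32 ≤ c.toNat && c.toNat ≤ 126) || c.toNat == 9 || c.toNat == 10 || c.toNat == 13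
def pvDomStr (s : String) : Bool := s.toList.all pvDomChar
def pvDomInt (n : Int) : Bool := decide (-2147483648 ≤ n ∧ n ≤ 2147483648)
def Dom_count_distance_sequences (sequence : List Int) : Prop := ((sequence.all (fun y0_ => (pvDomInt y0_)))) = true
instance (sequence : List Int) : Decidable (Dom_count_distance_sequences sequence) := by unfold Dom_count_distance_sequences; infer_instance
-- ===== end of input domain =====

-- B replaces A's two phases (build list of run-groups, then scan it) by one streaming pass
-- keeping only (prev, run_len); objective: simpler, same asymptotic cost.

-- ===== PORT A =====
-- one iteration of A's first loop; state = (groups, current_group, current_value)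
def cdsStepA (st : List (List Int) × List Int × Option Int) (value : Int) :
    List (List Int) × List Int × Option Int :=
  let groups := st.1
  let current_group := st.2.1
  let current_value := st.2.2
  let (groups, current_group) :=
    if some value ≠ current_value then
      if current_group ≠ [] then (groups ++ [current_group], ([] : List Int))
      else (groups, current_group)
    else (groups, current_group)
  (groups, current_group ++ [value], some value)

-- one iteration of A's second loop (group[0] exists for every group A builds;
-- the [] branch is an unreachable totality guard)
def cdsSecond (distances : List Int) (group : List Int) : List Int :=
  match group with
  | [] => distances
  | g0 :: _ =>
    if g0 = 0 then distances ++ [(group.length : Int)]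
    else if group.length ≥ 2 then
      (List.range (group.length - 1)).foldl (fun d _ => d ++ [(0 : Int)]) distances
    else distances

def count_distance_sequences (sequence : List Int) : List Int :=
  let st := sequence.foldl cdsStepA ([], [], none)
  let groups := if st.2.1 ≠ [] then st.1 ++ [st.2.1] else st.1
  groups.foldl cdsSecond []

-- ===== PORT B =====
-- Source B's _flush
def cdsFlush (distances : List Int) (prev : Option Int) (run_len : Nat) : List Int :=
  if run_len ≠ 0 then
    if prev = some 0 then distances ++ [(run_len : Int)]
    else distances ++ List.replicate (run_len - 1) (0 : Int)
  else distances

-- one iteration of Source B's loop; state = (distances, prev, run_len)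
def cdsStepB (st : List Int × Option Int × Nat) (v : Int) : List Int × Option Int × Nat :=
  let d := st.1
  let prev := st.2.1
  let rl := st.2.2
  if rl ≠ 0 ∧ some v = prev then (d, prev, rl + 1)
  else (cdsFlush d prev rl, some v, 1)

def count_distance_sequences_alt (sequence : List Int) : List Int :=
  let st := sequence.foldl cdsStepB ([], none, 0)
  cdsFlush st.1 st.2.1 st.2.2

-- ===== PRECONDITION & SPEC =====
def Spec_count_distance_sequences (sequence : List Int) (out : List Int) : Prop := out = count_distance_sequences_alt sequence
instance (sequence : List Int) (out : List Int) : Decidable (Spec_count_distance_sequences sequence out) := by unfold Spec_count_distance_sequences; infer_instance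

-- ===== CLAIM (what is proved, stated in full; the proofs are below) =====
def Claim_equal_count_distance_sequences : Prop := ∀ (sequence : List Int), Dom_count_distance_sequences sequence → Spec_count_distance_sequences sequence (count_distance_sequences sequence)

-- ===== LEMMAS AND PROOFS =====

-- invariant tying A's (current_group, current_value) to B's (prev, run_len)
def cdsInv (cg : List Int) (cv : Option Int) (n : Nat) : Prop :=
  match cv with
  | none => cg = [] ∧ n = 0
  | some v => cg = List.replicate n v ∧ 1 ≤ n

lemma cds_range_fold (k : Nat) (d : List Int) :
    (List.range k).foldl (fun d _ => d ++ [(0 : Int)]) d = d ++ List.replicate k 0 := by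
  induction k generalizing d with
  | zero => simp
  | succ m ih =>
      rw [List.range_succ, List.foldl_append, ih]
      simp [List.replicate_succ']

lemma cdsSecond_append (d g : List Int) : cdsSecond d g = d ++ cdsSecond [] g := by
  cases g with
  | nil => simp [cdsSecond]
  | cons g0 gs =>
      simp only [cdsSecond]
      split_ifs with h1 h2
      · simp
      · rw [cds_range_fold, cds_range_fold]
        simp
      · simp

lemma cds_repl_ne_nil (n : Nat) (v : Int) (h : 1 ≤ n) : List.replicate n v ≠ [] := by
  cases n with
  | zero => omega
  | succ m => simp [List.replicate_succ]

lemma cds_emit_append (gs : List (List Int)) (d g : List Int) :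
    (gs ++ [g]).foldl cdsSecond d = gs.foldl cdsSecond d ++ cdsSecond [] g := by
  rw [List.foldl_append, List.foldl_cons, List.foldl_nil, cdsSecond_append]

lemma cds_second_run (n : Nat) (v : Int) (hn : 1 ≤ n) :
    cdsSecond [] (List.replicate n v) = cdsFlush [] (some v) n := by
  obtain ⟨m, rfl⟩ : ∃ m, n = m + 1 := ⟨n - 1, by omega⟩
  cases m with
  | zero =>
      simp only [List.replicate, cdsSecond, cdsFlush]
      split_ifs <;> simp_all
  | succ k =>
      simp only [List.replicate_succ, cdsSecond, cdsFlush]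
      split_ifs with h1 h2 <;> simp_all [List.length_replicate]

lemma cds_flush_run (gs : List (List Int)) (d : List Int) (n : Nat) (v : Int) (hn : 1 ≤ n)
    (hd : d = gs.foldl cdsSecond []) :
    (gs ++ [List.replicate n v]).foldl cdsSecond [] = cdsFlush d (some v) n := by
  subst hd
  rw [cds_emit_append, cds_second_run n v hn]
  simp [cdsFlush]
  split_ifs <;> simp

lemma cds_main (rest : List Int) (gs : List (List Int)) (cg : List Int) (cv : Option Int)
    (n : Nat) (d : List Int) (hinv : cdsInv cg cv n) (hd : d = gs.foldl cdsSecond []) :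
    (let st := rest.foldl cdsStepA (gs, cg, cv)
     (if st.2.1 ≠ [] then st.1 ++ [st.2.1] else st.1).foldl cdsSecond [])
    = (let st := rest.foldl cdsStepB (d, cv, n)
       cdsFlush st.1 st.2.1 st.2.2) := by
  induction rest generalizing gs cg cv n d with
  | nil =>
      cases cv with
      | none =>
          obtain ⟨h1, h2⟩ := hinv
          subst h1 h2 hd
          simp [cdsFlush]
      | some v =>
          obtain ⟨h1, h2⟩ := hinv
          subst h1
          simp only [List.foldl_nil]
          rw [if_pos (cds_repl_ne_nil n v h2)]
          exact cds_flush_run gs d n v h2 hd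
  | cons x rest ih =>
      simp only [List.foldl_cons]
      cases cv with
      | none =>
          obtain ⟨h1, h2⟩ := hinv
          subst h1 h2
          have hA : cdsStepA (gs, ([] : List Int), (none : Option Int)) x
              = (gs, [x], some x) := by simp [cdsStepA]
          have hB : cdsStepB (d, (none : Option Int), 0) x = (d, some x, 1) := by
            simp [cdsStepB, cdsFlush]
          rw [hA, hB]
          exact ih gs [x] (some x) 1 d (by simp [cdsInv, List.replicate]) hd
      | some v =>
          obtain ⟨h1, h2⟩ := hinv
          subst h1
          by_cases hx : x = v
          · subst hx
            have hA : cdsStepA (gs, List.replicate n x, some x) x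
                = (gs, List.replicate (n + 1) x, some x) := by
              simp [cdsStepA, List.replicate_succ']
            have hB : cdsStepB (d, some x, n) x = (d, some x, n + 1) := by
              simp [cdsStepB]; omega
            rw [hA, hB]
            exact ih gs (List.replicate (n + 1) x) (some x) (n + 1) d
              (by simp [cdsInv]) hd
          · have hA : cdsStepA (gs, List.replicate n v, some v) x
                = (gs ++ [List.replicate n v], [x], some x) := by
              simp only [cdsStepA]
              rw [if_pos (by simp [hx]), if_pos (cds_repl_ne_nil n v h2)]
              simp
            have hB : cdsStepB (d, some v, n) x = (cdsFlush d (some v) n, some x, 1) := by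
              simp only [cdsStepB]
              rw [if_neg (by simp [hx])]
            rw [hA, hB]
            exact ih (gs ++ [List.replicate n v]) [x] (some x) 1 (cdsFlush d (some v) n)
              (by simp [cdsInv, List.replicate]) (cds_flush_run gs d n v h2 hd).symm

-- ===== VERDICT (by name: the statement is the Claim_ definition above) =====
theorem count_distance_sequences_spec : Claim_equal_count_distance_sequences := by
  intro sequence _
  unfold Spec_count_distance_sequences count_distance_sequences count_distance_sequences_alt
  exact cds_main sequence [] [] none 0 [] (by simp [cdsInv]) rfl
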